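-- pv_equiv track=rewrite | github.com/pypi-data/pypi-mirror-354 | packages/gammalearn/gammalearn-0.15.0-py3-none-any.whl/gammalearn/data/save_results/utils.py | merge_list_of_dict
-- ===== SOURCE A (Python) =====
-- def merge_list_of_dict(list_of_dict: list) -> dict:
--     """Merge a list of dict in a single dict, used for logging"""
--     # TODO: refactor with dict.update ?
--     merge_dict = {}
--     for dictionary in list_of_dict:
--         for k, v in dictionary.items():
--             if k not in merge_dict:
--                 merge_dict[k] = [v]
--             else:
--                 merge_dict[k].append(v)
--     return merge_dict
-- ===== SOURCE B (Python) =====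
-- def merge_list_of_dict(list_of_dict: list) -> dict:
--     """Merge a list of dict in a single dict, used for logging"""
--     keys = list(dict.fromkeys(k for d in list_of_dict for k in d))
--     return {k: [d[k] for d in list_of_dict if k in d] for k in keys}
-- ===== Notes on version B (the rewrite author's own statement) =====
-- stated objective: alternative
-- what changed: Replaces A's single interleaved pass that appends a value per encountered (dict,key) into a growing dict by a two-phase group-by: first collect the keys in first-appearance order via dict.fromkeys, then build the result key-outer/dict-inner with a dict comprehension gathering each key's values.
import Mathlib
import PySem

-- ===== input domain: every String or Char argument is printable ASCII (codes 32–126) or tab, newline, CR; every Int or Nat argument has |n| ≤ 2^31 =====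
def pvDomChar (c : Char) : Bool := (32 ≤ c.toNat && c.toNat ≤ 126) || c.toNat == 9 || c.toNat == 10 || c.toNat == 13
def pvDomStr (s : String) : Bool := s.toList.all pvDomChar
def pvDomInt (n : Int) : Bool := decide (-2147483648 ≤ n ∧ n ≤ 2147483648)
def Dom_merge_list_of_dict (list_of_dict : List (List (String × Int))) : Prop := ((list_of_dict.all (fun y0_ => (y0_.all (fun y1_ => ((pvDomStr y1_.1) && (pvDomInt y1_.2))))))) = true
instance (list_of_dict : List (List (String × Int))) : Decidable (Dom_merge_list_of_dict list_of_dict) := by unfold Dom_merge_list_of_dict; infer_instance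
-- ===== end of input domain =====

-- B replaces A's single interleaved pass (append per encountered (dict, key)) by a two-phase
-- group-by: collect the keys in first-appearance order, then gather each key's values per dict
-- (objective: alternative decomposition, same result).

-- ===== PORT A =====
def merge_list_of_dict (list_of_dict : List (List (String × Int))) : List (String × List Int) :=
  -- merge_dict = {}; for dictionary in list_of_dict: for k, v in dictionary.items(): …
  (list_of_dict.foldl
    (fun merge_dict dictionary =>
      dictionary.foldl
        (fun merge_dict kv =>
          match merge_dict.get? kv.1 with
          | none => merge_dict.insert kv.1 [kv.2]              -- if k not in merge_dict: merge_dict[k] = [v]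
          | some vs => merge_dict.insert kv.1 (vs ++ [kv.2]))  -- else: merge_dict[k].append(v)
        merge_dict)
    (PySem.Dict.empty : PySem.Dict String (List Int))).items

-- ===== PORT B =====
def merge_list_of_dict_alt (list_of_dict : List (List (String × Int))) : List (String × List Int) :=
  -- keys = list(dict.fromkeys(k for d in list_of_dict for k in d))
  let keys := PySem.List.dedup (list_of_dict.flatMap (fun d => d.map Prod.fst))
  -- {k: [d[k] for d in list_of_dict if k in d] for k in keys}
  keys.map (fun k => (k, list_of_dict.filterMap (fun d => (PySem.Dict.mk d).get? k)))

-- ===== PRECONDITION & SPEC =====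
-- Pre_ restricts the Lean inputs to those that encode actual Python inputs: every inner
-- association list must have pairwise-distinct keys, since it stands for a Python dict
-- (which cannot hold a duplicate key).  No Python input is excluded.
def Pre_merge_list_of_dict (list_of_dict : List (List (String × Int))) : Prop :=
  ∀ d ∈ list_of_dict, (d.map Prod.fst).Nodup
instance (list_of_dict : List (List (String × Int))) : Decidable (Pre_merge_list_of_dict list_of_dict) := by unfold Pre_merge_list_of_dict; infer_instance
def pvWitness_merge_list_of_dict : (List (List (String × Int))) := [[("a", 1), ("b", 2)], [("a", 3)], []]

def Spec_merge_list_of_dict (list_of_dict : List (List (String × Int))) (out : List (String × List Int)) : Prop := out = merge_list_of_dict_alt list_of_dict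
instance (list_of_dict : List (List (String × Int))) (out : List (String × List Int)) : Decidable (Spec_merge_list_of_dict list_of_dict out) := by unfold Spec_merge_list_of_dict; infer_instance

-- ===== CLAIM (what is proved, stated in full; the proofs are below) =====
def Claim_equal_merge_list_of_dict : Prop := ∀ (list_of_dict : List (List (String × Int))), Dom_merge_list_of_dict list_of_dict → Pre_merge_list_of_dict list_of_dict → Spec_merge_list_of_dict list_of_dict (merge_list_of_dict list_of_dict)

-- ===== LEMMAS AND PROOFS =====

-- The one-pair step of A's inner loop is exactly a `modify … (· ++ [v])`.
theorem pvStepA_eq :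
    (fun (m : PySem.Dict String (List Int)) (kv : String × Int) =>
      match m.get? kv.1 with
      | none => m.insert kv.1 [kv.2]
      | some vs => m.insert kv.1 (vs ++ [kv.2]))
    = fun m kv => m.modify kv.1 [] (· ++ [kv.2]) := by
  funext m kv
  cases h : m.get? kv.1 <;>
    simp [PySem.Dict.modify, PySem.Dict.getD_eq_get?_getD, h]

-- A's nested loops are one fold of that step over the concatenated pair list.
theorem pvFoldA_flat (lod : List (List (String × Int))) (m : PySem.Dict String (List Int)) :
    lod.foldl (fun m d => d.foldl (fun m kv => m.modify kv.1 [] (· ++ [kv.2])) m) m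
      = (lod.flatMap id).foldl (fun m kv => m.modify kv.1 [] (· ++ [kv.2])) m := by
  induction lod generalizing m with
  | nil => rfl
  | cons d t ih => simp [List.foldl_append, ih]

-- Keys of the accumulated dict: first-appearance-ordered set update.
theorem pvKeysA (L : List (String × Int)) (m : PySem.Dict String (List Int)) :
    (L.foldl (fun m kv => m.modify kv.1 [] (· ++ [kv.2])) m).keys
      = PySem.Set.update m.keys (L.map Prod.fst) := by
  induction L generalizing m with
  | nil => rfl
  | cons kv t ih =>
      rw [List.foldl_cons, ih]
      have hstep : (m.modify kv.1 [] (· ++ [kv.2])).keys = PySem.Set.add m.keys kv.1 := by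
        rw [PySem.Dict.keys_modify]
        by_cases h : m.contains kv.1 = true
        · rw [PySem.Dict.keys_insert_of_contains _ _ h]
          simp [PySem.Set.add, ← PySem.Dict.contains_iff_mem_keys, h]
        · rw [PySem.Dict.keys_insert_of_not_contains _ _ (by simpa using h)]
          simp [PySem.Set.add, ← PySem.Dict.contains_iff_mem_keys, h]
      rw [List.map_cons, hstep]
      rfl

-- The accumulated dict keeps its keys duplicate-free.
theorem pvNodupA (L : List (String × Int)) (m : PySem.Dict String (List Int))
    (h : m.keys.Nodup) :
    (L.foldl (fun m kv => m.modify kv.1 [] (· ++ [kv.2])) m).keys.Nodup := by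
  induction L generalizing m with
  | nil => exact h
  | cons kv t ih =>
      exact ih _ (by rw [PySem.Dict.keys_modify]; exact PySem.Dict.nodup_keys_insert _ _ _ h)

-- A dict with duplicate-free keys is the list of its (key, getD) pairs.
theorem pvItemsChar (d : PySem.Dict String (List Int)) (h : d.keys.Nodup) :
    d.items = d.keys.map (fun k => (k, d.getD k [])) := by
  unfold PySem.Dict.keys
  rw [List.map_map]
  conv_lhs => rw [← List.map_id d.items]
  apply List.map_congr_left
  intro p hp
  obtain ⟨k, v⟩ := p
  simp [PySem.Dict.getD_of_mem_items _ hp h]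

-- B side, one dict: first-match lookup of a duplicate-free association list = its filter on that key.
theorem pvLookupB (k : String) (d : List (String × Int)) (h : (d.map Prod.fst).Nodup) :
    ((PySem.Dict.mk d).get? k).toList = (d.filter (fun p => p.1 == k)).map (fun p => p.2) := by
  induction d with
  | nil => simp [PySem.Dict.get?]
  | cons p t ih =>
      obtain ⟨a, b⟩ := p
      rw [PySem.Dict.get?_mk_cons]
      have hh : (a :: t.map Prod.fst).Nodup := by simpa using h
      obtain ⟨ha, ht⟩ := List.nodup_cons.mp hh
      by_cases hak : a = k
      · subst hak
        have hnot : ∀ q ∈ t, ¬(q.1 == a) = true := by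
          intro q hq hq1
          have hmem : q.1 ∈ t.map Prod.fst := List.mem_map_of_mem hq
          exact ha (beq_iff_eq.mp hq1 ▸ hmem)
        simp [List.filter_eq_nil_iff.mpr hnot]
      · have hne : (a == k) = false := by simpa using hak
        simp [hne, ih ht]

-- B side, all dicts: the per-key gather = values of the key in the concatenated pair list.
theorem pvGatherB (k : String) (lod : List (List (String × Int)))
    (hall : ∀ d ∈ lod, (d.map Prod.fst).Nodup) :
    lod.filterMap (fun d => (PySem.Dict.mk d).get? k)
      = ((lod.flatMap id).filter (fun p => p.1 == k)).map (fun p => p.2) := by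
  induction lod with
  | nil => rfl
  | cons d t ih =>
      have h1 := pvLookupB k d (hall d (by simp))
      have h2 := ih (fun d' hd' => hall d' (by simp [hd']))
      cases hg : (PySem.Dict.mk d).get? k with
      | none =>
          rw [hg] at h1
          simp only [List.filterMap_cons, hg, List.flatMap_cons, id_eq, List.filter_append,
            List.map_append, ← h1, h2]
          rfl
      | some v =>
          rw [hg] at h1
          simp only [List.filterMap_cons, hg, List.flatMap_cons, id_eq, List.filter_append,
            List.map_append, ← h1, h2]
          rfl

-- ===== VERDICT (by name: the statement is the Claim_ definition above) =====
theorem merge_list_of_dict_spec : Claim_equal_merge_list_of_dict := by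
  intro lod _ hpre
  unfold Spec_merge_list_of_dict merge_list_of_dict merge_list_of_dict_alt
  rw [pvStepA_eq, pvFoldA_flat]
  have hnd : ((lod.flatMap id).foldl (fun m kv => m.modify kv.1 [] (· ++ [kv.2]))
      (PySem.Dict.empty : PySem.Dict String (List Int))).keys.Nodup :=
    pvNodupA _ _ (by simp [PySem.Dict.keys_empty])
  rw [pvItemsChar _ hnd, pvKeysA]
  have hkeys : PySem.Set.update (PySem.Dict.empty : PySem.Dict String (List Int)).keys
      ((lod.flatMap id).map Prod.fst)
      = PySem.List.dedup (lod.flatMap (fun d => d.map Prod.fst)) := by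
    simp [PySem.List.dedup_eq_ofList, PySem.Set.ofList, PySem.Set.update,
      PySem.Dict.keys_empty]
    rfl
  rw [hkeys]
  apply List.map_congr_left
  intro k _
  rw [PySem.Dict.getD_foldl_modify_append, PySem.Dict.getD_empty, List.nil_append,
    pvGatherB k lod hpre]
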